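-- pv_equiv track=rewrite | github.com/KKaichi/posi_nega | application.py | judge_positive_negative
-- ===== SOURCE A (Python) =====
-- def judge_positive_negative(word_list,pn_yougen_dic,pn_meishi_dic):
--     evaluate_result = []
--     for sentence in word_list:
--         sentence_result=[]
--         for word in sentence:
--             word_score = []
--             yougen_score = pn_yougen_dic.get(word)
--             meishi_score=pn_meishi_dic.get(word)
--             if(yougen_score != None and meishi_score != None):
--                 score = max(int(yougen_score),int(meishi_score))
--             elif(yougen_score != None):
--                 score = yougen_score
--             elif(meishi_score != None):
--                 score= meishi_score
--             else:
--                 score = None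
--             word_score = (word, score)
--             sentence_result.append(word_score)
--         evaluate_result.append(sentence_result)
--
--     return evaluate_result
-- ===== SOURCE B (Python) =====
-- def judge_positive_negative(word_list, pn_yougen_dic, pn_meishi_dic):
--     combined = dict(pn_meishi_dic)
--     for word, yougen_score in pn_yougen_dic.items():
--         old = combined.get(word)
--         if old is None:
--             combined[word] = yougen_score
--         else:
--             combined[word] = max(int(yougen_score), int(old))
--     return [[(word, combined.get(word)) for word in sentence] for sentence in word_list]
-- ===== Notes on version B (the rewrite author's own statement) =====
-- stated objective: simpler
-- what changed: B pre-merges the two dictionaries into one combined score table (max of int-coerced values on shared keys, raw value otherwise) built once, so scoring each word is a single .get instead of A's per-word double lookup and four-way branch.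
import Mathlib
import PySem

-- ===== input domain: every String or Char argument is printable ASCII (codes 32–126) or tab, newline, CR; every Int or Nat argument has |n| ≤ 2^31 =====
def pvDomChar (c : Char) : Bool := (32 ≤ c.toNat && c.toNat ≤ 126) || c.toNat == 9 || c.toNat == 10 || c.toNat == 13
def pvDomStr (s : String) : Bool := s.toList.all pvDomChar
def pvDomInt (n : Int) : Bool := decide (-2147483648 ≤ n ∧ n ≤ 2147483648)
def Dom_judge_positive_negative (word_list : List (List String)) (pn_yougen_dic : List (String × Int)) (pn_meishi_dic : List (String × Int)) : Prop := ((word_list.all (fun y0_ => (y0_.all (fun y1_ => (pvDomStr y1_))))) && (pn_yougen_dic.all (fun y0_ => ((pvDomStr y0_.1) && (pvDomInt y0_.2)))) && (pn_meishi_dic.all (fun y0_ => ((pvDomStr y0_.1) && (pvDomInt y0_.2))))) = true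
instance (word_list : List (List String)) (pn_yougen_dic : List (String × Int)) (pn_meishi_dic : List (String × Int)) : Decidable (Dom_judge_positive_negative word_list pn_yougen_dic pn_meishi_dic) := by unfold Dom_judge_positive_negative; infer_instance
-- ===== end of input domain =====

-- B builds one combined score dictionary once (max of the two values on shared keys, the raw value
-- otherwise) and then scores each word with a single lookup — simpler than A's per-word double
-- lookup with a four-way branch.

-- ===== PORT A =====
def judge_positive_negative (word_list : List (List String)) (pn_yougen_dic : List (String × Int)) (pn_meishi_dic : List (String × Int)) : List (List (String × Option Int)) :=
  word_list.foldl (fun evaluate_result sentence =>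
    evaluate_result ++ [sentence.foldl (fun sentence_result word =>
      let yougen_score := (PySem.Dict.mk pn_yougen_dic).get? word
      let meishi_score := (PySem.Dict.mk pn_meishi_dic).get? word
      let score : Option Int :=
        match yougen_score, meishi_score with
        | some y, some m => some (max y m)   -- int() on an int is the identity
        | some y, none => some y
        | none, some m => some m
        | none, none => none
      sentence_result ++ [(word, score)]) []]) []

-- ===== PORT B =====
-- one merge step of B's loop over pn_yougen_dic.items()
def pvMergeStep (c : PySem.Dict String Int) (kv : String × Int) : PySem.Dict String Int :=
  match c.get? kv.1 with
  | none => c.insert kv.1 kv.2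
  | some old => c.insert kv.1 (max kv.2 old)   -- int() on an int is the identity

def judge_positive_negative_alt (word_list : List (List String)) (pn_yougen_dic : List (String × Int)) (pn_meishi_dic : List (String × Int)) : List (List (String × Option Int)) :=
  let combined := pn_yougen_dic.foldl pvMergeStep (PySem.Dict.mk pn_meishi_dic)
  word_list.map (fun sentence => sentence.map (fun word => (word, combined.get? word)))

-- ===== PRECONDITION & SPEC =====
-- Pre_ excludes association lists with duplicate keys: those do not correspond to any Python dict
-- (A's arguments are dicts), so nothing about A's behaviour is claimed or hidden there.
def Pre_judge_positive_negative (word_list : List (List String)) (pn_yougen_dic : List (String × Int)) (pn_meishi_dic : List (String × Int)) : Prop :=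
  (pn_yougen_dic.map Prod.fst).Nodup ∧ (pn_meishi_dic.map Prod.fst).Nodup
instance (word_list : List (List String)) (pn_yougen_dic : List (String × Int)) (pn_meishi_dic : List (String × Int)) : Decidable (Pre_judge_positive_negative word_list pn_yougen_dic pn_meishi_dic) := by unfold Pre_judge_positive_negative; infer_instance

def pvWitness_judge_positive_negative : List (List String) × (List (String × Int)) × (List (String × Int)) :=
  ([["good", "bad", "meh"]], [("good", 1), ("bad", -1)], [("good", 2)])

def Spec_judge_positive_negative (word_list : List (List String)) (pn_yougen_dic : List (String × Int)) (pn_meishi_dic : List (String × Int)) (out : List (List (String × Option Int))) : Prop := out = judge_positive_negative_alt word_list pn_yougen_dic pn_meishi_dic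
instance (word_list : List (List String)) (pn_yougen_dic : List (String × Int)) (pn_meishi_dic : List (String × Int)) (out : List (List (String × Option Int))) : Decidable (Spec_judge_positive_negative word_list pn_yougen_dic pn_meishi_dic out) := by unfold Spec_judge_positive_negative; infer_instance

-- ===== CLAIM (what is proved, stated in full; the proofs are below) =====
def Claim_equal_judge_positive_negative : Prop := ∀ (word_list : List (List String)) (pn_yougen_dic : List (String × Int)) (pn_meishi_dic : List (String × Int)), Dom_judge_positive_negative word_list pn_yougen_dic pn_meishi_dic → Pre_judge_positive_negative word_list pn_yougen_dic pn_meishi_dic → Spec_judge_positive_negative word_list pn_yougen_dic pn_meishi_dic (judge_positive_negative word_list pn_yougen_dic pn_meishi_dic)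

-- ===== LEMMAS AND PROOFS =====

-- the per-word score A computes, as a function of the two raw lookups
def pvMerge (y m : Option Int) : Option Int :=
  match y, m with
  | some y, some m => some (max y m)
  | some y, none => some y
  | none, some m => some m
  | none, none => none

-- invariant of B's merge loop: a lookup in the folded dict is A's merge of the two raw lookups
lemma combined_get? (yd : List (String × Int)) (c : PySem.Dict String Int)
    (hy : (yd.map Prod.fst).Nodup) (w : String) :
    (yd.foldl pvMergeStep c).get? w = pvMerge ((PySem.Dict.mk yd).get? w) (c.get? w) := by
  induction yd generalizing c with
  | nil =>
    have h0 : (PySem.Dict.mk ([] : List (String × Int))).get? w = none := by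
      simp [PySem.Dict.get?]
    rw [List.foldl_nil, h0]
    cases c.get? w <;> rfl
  | cons kv rest ih =>
    obtain ⟨k, v⟩ := kv
    simp only [List.map_cons, List.nodup_cons] at hy
    rw [List.foldl_cons, ih _ hy.2, PySem.Dict.get?_mk_cons]
    by_cases hw : k = w
    · subst hw
      have hrest : (PySem.Dict.mk rest).get? k = none :=
        (PySem.Dict.get?_eq_none_iff_not_mem_keys _ _).mpr
          (by simpa [PySem.Dict.keys] using hy.1)
      rw [hrest]
      unfold pvMergeStep
      cases hc : c.get? k <;>
        simp [PySem.Dict.get?_insert_self, pvMerge]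
    · have hstep : (pvMergeStep c (k, v)).get? w = c.get? w := by
        unfold pvMergeStep
        cases c.get? k <;>
          exact PySem.Dict.get?_insert_of_ne c _ (fun h => hw h.symm)
      have hbeq : (k == w) = false := by simpa using hw
      rw [hstep, hbeq]
      simp

-- ===== VERDICT (by name: the statement is the Claim_ definition above) =====
theorem judge_positive_negative_spec : Claim_equal_judge_positive_negative := by
  intro word_list pn_yougen_dic pn_meishi_dic _hdom hpre
  unfold Spec_judge_positive_negative judge_positive_negative judge_positive_negative_alt
  rw [PySem.List.foldl_append_singleton_eq_map]
  simp only [List.nil_append]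
  apply List.map_congr_left
  intro sentence _
  rw [PySem.List.foldl_append_singleton_eq_map]
  simp only [List.nil_append]
  apply List.map_congr_left
  intro word _
  rw [combined_get? _ _ hpre.1]
  rfl
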